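-- pv_equiv track=rewrite | github.com/labhai/SafeECGMatch | scripts/preprocess_cinc2021.py | assign_single_label
-- ===== SOURCE A (Python) =====
-- NORMAL_CODE = "426783006"
--
-- def assign_single_label(dx_codes: list[str], label_sets: dict[str, set[str]]) -> str | None:
--     if len(dx_codes) == 1 and dx_codes[0] == NORMAL_CODE:
--         return "Normal"
--
--     matched_groups = {
--         label_name
--         for code in dx_codes
--         for label_name, codes in label_sets.items()
--         if code in codes
--     }
--     if len(matched_groups) != 1:
--         return None
--     return next(iter(matched_groups))
-- ===== SOURCE B (Python) =====
-- NORMAL_CODE = "426783006"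
--
-- def assign_single_label(dx_codes, label_sets):
--     if len(dx_codes) == 1 and dx_codes[0] == NORMAL_CODE:
--         return "Normal"
--     index = {}
--     for label_name, codes in label_sets.items():
--         for code in codes:
--             index.setdefault(code, set()).add(label_name)
--     matched = set()
--     for code in dx_codes:
--         matched |= index.get(code, set())
--     if len(matched) != 1:
--         return None
--     return next(iter(matched))
-- ===== Notes on version B (the rewrite author's own statement) =====
-- stated objective: faster
-- what changed: Replaces the nested scan over dx_codes x label_sets with a reverse index built once (code -> set of label names) followed by a single lookup-and-union pass over dx_codes.
import Mathlib
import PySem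

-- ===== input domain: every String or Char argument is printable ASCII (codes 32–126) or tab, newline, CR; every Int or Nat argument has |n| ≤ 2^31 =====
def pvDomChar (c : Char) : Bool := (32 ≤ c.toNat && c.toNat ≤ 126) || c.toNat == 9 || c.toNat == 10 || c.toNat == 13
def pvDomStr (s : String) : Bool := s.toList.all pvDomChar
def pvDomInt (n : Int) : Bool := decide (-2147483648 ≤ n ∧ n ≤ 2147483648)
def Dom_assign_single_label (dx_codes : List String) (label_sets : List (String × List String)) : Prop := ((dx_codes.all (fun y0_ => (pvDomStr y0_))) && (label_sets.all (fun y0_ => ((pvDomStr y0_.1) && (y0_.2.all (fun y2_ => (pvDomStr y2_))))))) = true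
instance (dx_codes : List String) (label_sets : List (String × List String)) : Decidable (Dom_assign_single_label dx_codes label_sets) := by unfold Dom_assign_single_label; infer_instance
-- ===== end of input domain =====

-- B replaces A's nested scan (dx_codes × label_sets) with a reverse index code → label-name set
-- built once from label_sets, then a single lookup-and-union pass over dx_codes (objective: faster).


def NORMAL_CODE : String := "426783006"

-- ===== PORT A =====
def assign_single_label (dx_codes : List String) (label_sets : List (String × List String)) : Option String :=
  if dx_codes.length = 1 ∧ dx_codes.headD "" = NORMAL_CODE then some "Normal"
  else
    let matched : PySem.Set String :=
      dx_codes.foldl (fun acc code =>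
        label_sets.foldl (fun acc2 p => if code ∈ p.2 then PySem.Set.add acc2 p.1 else acc2) acc)
        PySem.Set.empty
    if matched.length ≠ 1 then none else matched.head?

-- ===== PORT B =====
-- index.setdefault(code, set()).add(label_name)  ==  index[code] = index.get(code, set()) ∪ {label_name}
def asl_index (label_sets : List (String × List String)) : PySem.Dict String (PySem.Set String) :=
  label_sets.foldl (fun d p =>
    p.2.foldl (fun d2 code => d2.modify code PySem.Set.empty (fun s => PySem.Set.add s p.1)) d)
    PySem.Dict.empty

def assign_single_label_alt (dx_codes : List String) (label_sets : List (String × List String)) : Option String :=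
  if dx_codes.length = 1 ∧ dx_codes.headD "" = NORMAL_CODE then some "Normal"
  else
    let index := asl_index label_sets
    let matched : PySem.Set String :=
      dx_codes.foldl (fun acc code => PySem.Set.union acc (index.getD code PySem.Set.empty))
        PySem.Set.empty
    if matched.length ≠ 1 then none else matched.head?

-- ===== PRECONDITION & SPEC =====
def Spec_assign_single_label (dx_codes : List String) (label_sets : List (String × List String)) (out : Option String) : Prop := out = assign_single_label_alt dx_codes label_sets
instance (dx_codes : List String) (label_sets : List (String × List String)) (out : Option String) : Decidable (Spec_assign_single_label dx_codes label_sets out) := by unfold Spec_assign_single_label; infer_instance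

-- ===== CLAIM (what is proved, stated in full; the proofs are below) =====
def Claim_equal_assign_single_label : Prop := ∀ (dx_codes : List String) (label_sets : List (String × List String)), Dom_assign_single_label dx_codes label_sets → Spec_assign_single_label dx_codes label_sets (assign_single_label dx_codes label_sets)

-- ===== LEMMAS AND PROOFS =====

-- A's inner loop: membership
theorem asl_mem_inner (ls : List (String × List String)) (code : String) (acc : PySem.Set String) (x : String) :
    x ∈ ls.foldl (fun acc2 p => if code ∈ p.2 then PySem.Set.add acc2 p.1 else acc2) acc ↔
      x ∈ acc ∨ ∃ p ∈ ls, x = p.1 ∧ code ∈ p.2 := by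
  induction ls generalizing acc with
  | nil => simp
  | cons p ls ih =>
    simp only [List.foldl_cons, ih]
    split_ifs with h
    · simp [PySem.Set.mem_add, h, or_assoc]
    · simp only [List.mem_cons]
      constructor
      · rintro (hx | ⟨q, hq, h1, h2⟩)
        · exact Or.inl hx
        · exact Or.inr ⟨q, Or.inr hq, h1, h2⟩
      · rintro (hx | ⟨q, hq | hq, h1, h2⟩)
        · exact Or.inl hx
        · exact absurd (hq ▸ h2) h
        · exact Or.inr ⟨q, hq, h1, h2⟩

theorem asl_nodup_inner (ls : List (String × List String)) (code : String) (acc : PySem.Set String)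
    (hacc : acc.Nodup) :
    (ls.foldl (fun acc2 p => if code ∈ p.2 then PySem.Set.add acc2 p.1 else acc2) acc).Nodup := by
  induction ls generalizing acc with
  | nil => exact hacc
  | cons p ls ih =>
    simp only [List.foldl_cons]
    exact ih _ (by split_ifs <;> [exact PySem.Set.nodup_add _ _ hacc; exact hacc])

-- A's set comprehension: membership
theorem asl_mem_A (dx : List String) (ls : List (String × List String)) (acc : PySem.Set String) (x : String) :
    x ∈ dx.foldl (fun acc code =>
        ls.foldl (fun acc2 p => if code ∈ p.2 then PySem.Set.add acc2 p.1 else acc2) acc) acc ↔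
      x ∈ acc ∨ ∃ c ∈ dx, ∃ p ∈ ls, x = p.1 ∧ c ∈ p.2 := by
  induction dx generalizing acc with
  | nil => simp
  | cons c dx ih =>
    simp only [List.foldl_cons, ih, asl_mem_inner, List.mem_cons]
    constructor
    · rintro (⟨hx | h⟩ | ⟨c', hc', h⟩)
      · exact Or.inl hx
      · exact Or.inr ⟨c, Or.inl rfl, h⟩
      · exact Or.inr ⟨c', Or.inr hc', h⟩
    · rintro (hx | ⟨c', hc' | hc', h⟩)
      · exact Or.inl (Or.inl hx)
      · exact Or.inl (Or.inr (hc' ▸ h))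
      · exact Or.inr ⟨c', hc', h⟩

theorem asl_nodup_A (dx : List String) (ls : List (String × List String)) (acc : PySem.Set String)
    (hacc : acc.Nodup) :
    (dx.foldl (fun acc code =>
        ls.foldl (fun acc2 p => if code ∈ p.2 then PySem.Set.add acc2 p.1 else acc2) acc) acc).Nodup := by
  induction dx generalizing acc with
  | nil => exact hacc
  | cons c dx ih => exact ih _ (asl_nodup_inner ls c acc hacc)

-- index entries after the inner loop of the index build
theorem asl_idx_inner (codes : List String) (name : String)
    (d : PySem.Dict String (PySem.Set String)) (c x : String) :
    x ∈ (codes.foldl (fun d2 code => d2.modify code PySem.Set.empty (fun s => PySem.Set.add s name)) d).getD c PySem.Set.empty ↔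
      x ∈ d.getD c PySem.Set.empty ∨ (c ∈ codes ∧ x = name) := by
  induction codes generalizing d with
  | nil => simp
  | cons cd codes ih =>
    simp only [List.foldl_cons, ih, PySem.Dict.getD_modify, List.mem_cons]
    split_ifs with h
    · subst h
      simp [PySem.Set.mem_add]
      tauto
    · constructor
      · rintro (hx | ⟨hc, hn⟩)
        · exact Or.inl hx
        · exact Or.inr ⟨Or.inr hc, hn⟩
      · rintro (hx | ⟨hc | hc, hn⟩)
        · exact Or.inl hx
        · exact absurd hc h
        · exact Or.inr ⟨hc, hn⟩

-- the full reverse index: membership of each entry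
theorem asl_idx_mem (ls : List (String × List String)) (c x : String) :
    x ∈ (asl_index ls).getD c PySem.Set.empty ↔ ∃ p ∈ ls, x = p.1 ∧ c ∈ p.2 := by
  suffices h : ∀ (d : PySem.Dict String (PySem.Set String)),
      x ∈ (ls.foldl (fun d p =>
          p.2.foldl (fun d2 code => d2.modify code PySem.Set.empty (fun s => PySem.Set.add s p.1)) d) d).getD c PySem.Set.empty ↔
        x ∈ d.getD c PySem.Set.empty ∨ ∃ p ∈ ls, x = p.1 ∧ c ∈ p.2 by
    rw [asl_index, h PySem.Dict.empty]
    simp [PySem.Dict.getD_empty]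
  intro d
  induction ls generalizing d with
  | nil => simp
  | cons p ls ih =>
    simp only [List.foldl_cons, ih, asl_idx_inner, List.mem_cons]
    constructor
    · rintro (⟨hx | ⟨hc, hn⟩⟩ | ⟨q, hq, h1, h2⟩)
      · exact Or.inl hx
      · exact Or.inr ⟨p, Or.inl rfl, hn, hc⟩
      · exact Or.inr ⟨q, Or.inr hq, h1, h2⟩
    · rintro (hx | ⟨q, hq | hq, h1, h2⟩)
      · exact Or.inl (Or.inl hx)
      · exact Or.inl (Or.inr ⟨hq ▸ h2, hq ▸ h1⟩)
      · exact Or.inr ⟨q, hq, h1, h2⟩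

-- B's union loop: membership and nodup
theorem asl_mem_B (dx : List String) (idx : PySem.Dict String (PySem.Set String)) (acc : PySem.Set String) (x : String) :
    x ∈ dx.foldl (fun acc code => PySem.Set.union acc (idx.getD code PySem.Set.empty)) acc ↔
      x ∈ acc ∨ ∃ c ∈ dx, x ∈ idx.getD c PySem.Set.empty := by
  induction dx generalizing acc with
  | nil => simp
  | cons c dx ih =>
    simp only [List.foldl_cons, ih, PySem.Set.mem_union, List.mem_cons]
    constructor
    · rintro (⟨hx | hx⟩ | ⟨c', hc', hx⟩)
      · exact Or.inl hx
      · exact Or.inr ⟨c, Or.inl rfl, hx⟩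
      · exact Or.inr ⟨c', Or.inr hc', hx⟩
    · rintro (hx | ⟨c', hc' | hc', hx⟩)
      · exact Or.inl (Or.inl hx)
      · exact Or.inl (Or.inr (hc' ▸ hx))
      · exact Or.inr ⟨c', hc', hx⟩

theorem asl_nodup_B (dx : List String) (idx : PySem.Dict String (PySem.Set String)) (acc : PySem.Set String)
    (hacc : acc.Nodup) :
    (dx.foldl (fun acc code => PySem.Set.union acc (idx.getD code PySem.Set.empty)) acc).Nodup := by
  induction dx generalizing acc with
  | nil => exact hacc
  | cons c dx ih => exact ih _ (PySem.Set.nodup_union _ _ hacc)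

-- two nodup lists with the same members give the same "single element or none" result
theorem asl_single (S T : List String) (hS : S.Nodup) (hT : T.Nodup)
    (h : ∀ x, x ∈ S ↔ x ∈ T) :
    (if S.length ≠ 1 then none else S.head?) = (if T.length ≠ 1 then none else T.head?) := by
  have hperm : S.Perm T := (List.perm_ext_iff_of_nodup hS hT).mpr h
  have hlen : S.length = T.length := hperm.length_eq
  rw [hlen]
  split_ifs with h1
  · rfl
  · push Not at h1
    obtain ⟨a, rfl⟩ := List.length_eq_one_iff.mp h1
    obtain ⟨b, rfl⟩ := List.length_eq_one_iff.mp (hlen ▸ h1)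
    have hab : a = b := by simpa using hperm.mem_iff (a := a)
    simp [hab]

-- ===== VERDICT (by name: the statement is the Claim_ definition above) =====
theorem assign_single_label_spec : Claim_equal_assign_single_label := by
  intro dx ls _
  unfold Spec_assign_single_label assign_single_label assign_single_label_alt
  split_ifs with h
  · rfl
  · exact asl_single _ _ (asl_nodup_A dx ls _ List.nodup_nil) (asl_nodup_B dx _ _ List.nodup_nil)
      (fun x => by
        rw [asl_mem_A, asl_mem_B]
        simp only [asl_idx_mem])
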